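-- pv_equiv track=rewrite | github.com/lisphacker/leetcode | trees_and_graphs/alien_dictionary.py | compute_graph
-- ===== SOURCE A (Python) =====
-- from typing import List, Dict, Set, Tuple
--
-- Graph = Dict[str, Set[str]]
--
-- Ordering = List[str]
--
-- def compute_graph(orderings: List[Ordering]) -> Tuple[Graph, Graph]:
--     forward_graph = dict()
--     backward_graph = dict()
--
--     for ordering in orderings:
--         if len(ordering) == 1:
--             i = ordering[0]
--             if i not in forward_graph:
--                 forward_graph[i] = set()
--         else:
--             for i, j in zip(ordering, ordering[1:]):
--                 if i in forward_graph:
--                     forward_graph[i].add(j)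
--                 else:
--                     forward_graph[i] = set([j])
--
--                 if j in backward_graph:
--                     backward_graph[j].add(i)
--                 else:
--                     backward_graph[j] = set([i])
--
--     return forward_graph, backward_graph
-- ===== SOURCE B (Python) =====
-- from typing import List, Dict, Set, Tuple
--
-- Graph = Dict[str, Set[str]]
-- Ordering = List[str]
--
-- def _sources(o: Ordering) -> List[str]:
--     # nodes that get a forward_graph key from this ordering
--     return o if len(o) == 1 else [i for i, _ in zip(o, o[1:])]
--
-- def compute_graph(orderings: List[Ordering]) -> Tuple[Graph, Graph]:
--     # Grouping approach: materialise the adjacent-pair list once, then build each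
--     # graph as a dict comprehension over its deduplicated key sequence, collecting
--     # each key's neighbors by scanning the pair list (no incremental set mutation).
--     pairs = [p for o in orderings for p in zip(o, o[1:])]
--     fwd_keys = list(dict.fromkeys(n for o in orderings for n in _sources(o)))
--     bwd_keys = list(dict.fromkeys(j for _, j in pairs))
--     forward = {i: {j for i2, j in pairs if i2 == i} for i in fwd_keys}
--     backward = {j: {i for i, j2 in pairs if j2 == j} for j in bwd_keys}
--     return forward, backward
-- ===== Notes on version B (the rewrite author's own statement) =====
-- stated objective: alternative
-- what changed: B replaces A's single incremental pass that mutates per-key sets in both dicts with a grouping construction: it materialises the adjacent-pair list once, computes each graph's key sequence by ordered deduplication (dict.fromkeys), and builds each graph as a dict comprehension whose value for a key is collected by a scan of the pair list, so no set is ever mutated after creation.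
import Mathlib
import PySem

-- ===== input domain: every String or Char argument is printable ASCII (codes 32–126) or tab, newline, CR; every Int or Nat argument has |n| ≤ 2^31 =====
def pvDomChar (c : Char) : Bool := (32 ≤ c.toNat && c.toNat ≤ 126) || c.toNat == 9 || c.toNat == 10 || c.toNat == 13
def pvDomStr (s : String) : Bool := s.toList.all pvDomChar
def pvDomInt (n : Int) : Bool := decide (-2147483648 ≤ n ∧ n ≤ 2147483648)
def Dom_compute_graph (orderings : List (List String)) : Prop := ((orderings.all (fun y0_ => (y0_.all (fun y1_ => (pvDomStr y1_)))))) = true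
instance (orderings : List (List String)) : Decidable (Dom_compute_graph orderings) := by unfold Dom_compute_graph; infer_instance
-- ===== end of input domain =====

-- B builds each graph by grouping over a materialised pair list (ordered-dedup key
-- sequence + one collecting scan per key) instead of A's incremental set mutation
-- (objective: alternative; not claimed faster).

-- ===== PORT A =====
-- one edge (i, j) of an ordering of length ≥ 2: the two if/else membership branches of A
def cgA_edge (st : PySem.Dict String (PySem.Set String) × PySem.Dict String (PySem.Set String))
    (p : String × String) :
    PySem.Dict String (PySem.Set String) × PySem.Dict String (PySem.Set String) :=
  let fwd := if st.1.contains p.1 then st.1.modify p.1 PySem.Set.empty (fun s => PySem.Set.add s p.2)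
             else st.1.insert p.1 (PySem.Set.ofList [p.2])
  let bwd := if st.2.contains p.2 then st.2.modify p.2 PySem.Set.empty (fun s => PySem.Set.add s p.1)
             else st.2.insert p.2 (PySem.Set.ofList [p.1])
  (fwd, bwd)

-- body of A's outer 'for ordering in orderings' loop
def cgA_step (st : PySem.Dict String (PySem.Set String) × PySem.Dict String (PySem.Set String))
    (ordering : List String) :
    PySem.Dict String (PySem.Set String) × PySem.Dict String (PySem.Set String) :=
  if ordering.length = 1 then
    -- ordering[0]; in range because the guard says length = 1
    let i := ordering.headD ""
    (if st.1.contains i then st.1 else st.1.insert i PySem.Set.empty, st.2)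
  else
    (ordering.zip (ordering.drop 1)).foldl cgA_edge st

def compute_graph (orderings : List (List String)) :
    (List (String × List String)) × (List (String × List String)) :=
  let r := orderings.foldl cgA_step (PySem.Dict.empty, PySem.Dict.empty)
  (r.1.items, r.2.items)

-- ===== PORT B =====
-- _sources: nodes that get a forward_graph key from one ordering
def cgB_sources (o : List String) : List String :=
  if o.length = 1 then o else (o.zip (o.drop 1)).map Prod.fst

def compute_graph_alt (orderings : List (List String)) :
    (List (String × List String)) × (List (String × List String)) :=
  let pairs := orderings.flatMap (fun o => o.zip (o.drop 1))
  let fwdKeys := PySem.List.dedup (orderings.flatMap cgB_sources)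
  let bwdKeys := PySem.List.dedup (pairs.map Prod.snd)
  let forward := fwdKeys.foldl
    (fun d i => d.insert i (PySem.Set.ofList ((pairs.filter (fun p => p.1 == i)).map Prod.snd)))
    PySem.Dict.empty
  let backward := bwdKeys.foldl
    (fun d j => d.insert j (PySem.Set.ofList ((pairs.filter (fun p => p.2 == j)).map Prod.fst)))
    PySem.Dict.empty
  (forward.items, backward.items)

-- ===== PRECONDITION & SPEC =====
def Spec_compute_graph (orderings : List (List String)) (out : (List (String × List String)) × (List (String × List String))) : Prop := out = compute_graph_alt orderings
instance (orderings : List (List String)) (out : (List (String × List String)) × (List (String × List String))) : Decidable (Spec_compute_graph orderings out) := by unfold Spec_compute_graph; infer_instance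

-- ===== CLAIM (what is proved, stated in full; the proofs are below) =====
def Claim_equal_compute_graph : Prop := ∀ (orderings : List (List String)), Dom_compute_graph orderings → Spec_compute_graph orderings (compute_graph orderings)

-- ===== LEMMAS AND PROOFS =====

-- event stream: (c, none) for a singleton ordering, (i, some j) per adjacent pair
def cgEv (o : List String) : List (String × Option String) :=
  if o.length = 1 then [(o.headD "", none)]
  else (o.zip (o.drop 1)).map (fun p => (p.1, some p.2))

-- A's forward-dict action of one event
def cgStepF (d : PySem.Dict String (PySem.Set String)) (e : String × Option String) :
    PySem.Dict String (PySem.Set String) :=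
  match e.2 with
  | none => if d.contains e.1 then d else d.insert e.1 PySem.Set.empty
  | some j => if d.contains e.1 then d.modify e.1 PySem.Set.empty (fun s => PySem.Set.add s j)
              else d.insert e.1 (PySem.Set.ofList [j])

-- A's backward-dict action of one event
def cgStepB (d : PySem.Dict String (PySem.Set String)) (e : String × Option String) :
    PySem.Dict String (PySem.Set String) :=
  match e.2 with
  | none => d
  | some j => if d.contains j then d.modify j PySem.Set.empty (fun s => PySem.Set.add s e.1)
              else d.insert j (PySem.Set.ofList [e.1])

def cgSuccs (evs : List (String × Option String)) (i : String) : List String :=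
  evs.filterMap (fun e => if e.1 == i then e.2 else none)

def cgPreds (evs : List (String × Option String)) (j : String) : List String :=
  evs.filterMap (fun e => if e.2 == some j then some e.1 else none)

theorem cgA_edge_split (st : PySem.Dict String (PySem.Set String) × PySem.Dict String (PySem.Set String))
    (p : String × String) :
    cgA_edge st p = (cgStepF st.1 (p.1, some p.2), cgStepB st.2 (p.1, some p.2)) := rfl

theorem cgA_pairfold (l : List (String × String))
    (st : PySem.Dict String (PySem.Set String) × PySem.Dict String (PySem.Set String)) :
    l.foldl cgA_edge st
      = ((l.map (fun p => (p.1, some p.2))).foldl cgStepF st.1,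
         (l.map (fun p => (p.1, some p.2))).foldl cgStepB st.2) := by
  induction l generalizing st with
  | nil => rfl
  | cons p l ih => simp only [List.foldl_cons, List.map_cons, ih, cgA_edge_split]

theorem cgA_step_split (st : PySem.Dict String (PySem.Set String) × PySem.Dict String (PySem.Set String))
    (o : List String) :
    cgA_step st o = ((cgEv o).foldl cgStepF st.1, (cgEv o).foldl cgStepB st.2) := by
  unfold cgA_step cgEv
  by_cases h : o.length = 1
  · simp only [h, if_true, List.foldl_cons, List.foldl_nil, cgStepF, cgStepB]
  · simp only [h, if_false, cgA_pairfold]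

theorem cgA_fold_split (l : List (List String))
    (st : PySem.Dict String (PySem.Set String) × PySem.Dict String (PySem.Set String)) :
    l.foldl cgA_step st
      = ((l.flatMap cgEv).foldl cgStepF st.1, (l.flatMap cgEv).foldl cgStepB st.2) := by
  induction l generalizing st with
  | nil => rfl
  | cons o l ih => simp only [List.foldl_cons, List.flatMap_cons, List.foldl_append, ih, cgA_step_split]

-- ordered dedup of a snoc
theorem dedup_snoc (xs : List String) (x : String) :
    PySem.List.dedup (xs ++ [x]) = if x ∈ xs then PySem.List.dedup xs else PySem.List.dedup xs ++ [x] := by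
  simp only [PySem.List.dedup_eq_ofList, PySem.Set.ofList_eq_foldl, List.foldl_append,
    List.foldl_cons, List.foldl_nil]
  by_cases h : x ∈ xs
  · have hc : PySem.Set.contains (PySem.Set.ofList xs) x = true := by
      simp [PySem.Set.contains, PySem.Set.mem_ofList, h]
    simpa [PySem.Set.add, PySem.Set.ofList_eq_foldl, h] using hc
  · have hc : PySem.Set.contains (PySem.Set.ofList xs) x = false := by
      simp [PySem.Set.contains, PySem.Set.mem_ofList, h]
    simpa [PySem.Set.add, PySem.Set.ofList_eq_foldl, h] using hc

theorem ofList_snoc (xs : List String) (x : String) :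
    PySem.Set.ofList (xs ++ [x]) = PySem.Set.add (PySem.Set.ofList xs) x := by
  simp [PySem.Set.ofList_eq_foldl, List.foldl_append]

-- the characterized dicts have nodup key lists
theorem keys_of_items_map {ks : List String} {f : String → PySem.Set String}
    (d : PySem.Dict String (PySem.Set String)) (h : d.items = ks.map (fun i => (i, f i))) :
    d.keys = ks := by
  simp [PySem.Dict.keys, h, List.map_map, Function.comp_def]

theorem contains_of_items_map {ks : List String} {f : String → PySem.Set String}
    (d : PySem.Dict String (PySem.Set String)) (h : d.items = ks.map (fun i => (i, f i)))
    (x : String) : d.contains x = decide (x ∈ ks) := by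
  rw [PySem.Dict.contains_eq_decide_mem_keys, keys_of_items_map d h]

-- forward characterization
theorem fwd_char (evs : List (String × Option String)) :
    ((evs.foldl cgStepF PySem.Dict.empty)).items
      = (PySem.List.dedup (evs.map Prod.fst)).map (fun i => (i, PySem.Set.ofList (cgSuccs evs i))) := by
  induction evs using List.reverseRecOn with
  | nil => rfl
  | append_singleton evs e ih =>
    have hnd : (PySem.List.dedup (evs.map Prod.fst)).Nodup := PySem.List.nodup_dedup _
    set d := evs.foldl cgStepF PySem.Dict.empty with hd
    have hkeys := keys_of_items_map d ih
    have hcont := contains_of_items_map d ih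
    have hsuccs : ∀ i, cgSuccs (evs ++ [e]) i = cgSuccs evs i ++ (if e.1 == i then e.2 else none).toList := by
      intro i
      rw [cgSuccs, cgSuccs, List.filterMap_append]
      obtain ⟨a, b⟩ := e
      cases b <;> by_cases hb : a = i <;> simp [hb]
    have hnew : (e.1 ∈ evs.map Prod.fst) = False → cgSuccs evs e.1 = [] := by
      intro h
      simp only [eq_iff_iff, iff_false] at h
      refine List.filterMap_eq_nil_iff.mpr ?_
      intro a ha
      have : a.1 ≠ e.1 := fun hh => h (by simpa [hh] using List.mem_map_of_mem (f := Prod.fst) ha)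
      simp [beq_iff_eq, this]
    rw [List.foldl_append, List.foldl_cons, List.foldl_nil, ← hd]
    simp only [List.map_append, List.map_cons, List.map_nil]
    rw [dedup_snoc]
    by_cases hmem : e.1 ∈ evs.map Prod.fst
    · simp only [hmem, if_true]
      match he : e.2 with
      | none =>
        have : cgStepF d e = d := by simp [cgStepF, he, hcont, PySem.List.mem_dedup, hmem]
        rw [this, ih]
        refine List.map_congr_left (fun i hi => ?_)
        simp [hsuccs, he]
      | some j =>
        have hstep : cgStepF d e = d.insert e.1 (PySem.Set.add (d.getD e.1 PySem.Set.empty) j) := by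
          simp only [cgStepF, he, hcont, PySem.List.mem_dedup, hmem, decide_true, if_true]
          rfl
        have hget : d.getD e.1 PySem.Set.empty = PySem.Set.ofList (cgSuccs evs e.1) := by
          exact PySem.Dict.getD_of_mem_items d
            (by rw [ih]; exact List.mem_map_of_mem (by simpa [PySem.List.mem_dedup] using hmem))
            (by rw [hkeys]; exact hnd) _
        rw [hstep, PySem.Dict.items_insert_of_contains d _ (by simp [hcont, PySem.List.mem_dedup, hmem]), ih]
        rw [List.map_map]
        refine List.map_congr_left (fun i hi => ?_)
        by_cases hie : i = e.1
        · subst hie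
          simp [hsuccs, he, ofList_snoc, Function.comp_def]
          rw [← hget]
          rfl
        · have hh : (i == e.1) = false := by simp [hie]
          have hei : ¬ e.1 = i := fun hx => hie hx.symm
          simp [hsuccs, he, Function.comp_def, hh, hie, hei]
    · simp only [hmem, if_false]
      have hc : d.contains e.1 = false := by simp [hcont, PySem.List.mem_dedup, hmem]
      have hzero : cgSuccs evs e.1 = [] := hnew (by simp [hmem])
      match he : e.2 with
      | none =>
        have : cgStepF d e = d.insert e.1 PySem.Set.empty := by simp [cgStepF, he, hc]
        rw [this, PySem.Dict.items_insert_of_not_contains d _ hc, ih, List.map_append]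
        congr 1
        · refine List.map_congr_left (fun i hi => ?_)
          have hine : (e.1 == i) = false := by
            have : i ∈ evs.map Prod.fst := by
              have := (PySem.List.mem_dedup (xs := evs.map Prod.fst) (x := i)).mp hi
              exact this
            simp only [beq_eq_false_iff_ne, ne_eq]
            intro hh; exact hmem (hh ▸ this)
          simp [hsuccs, hine]
        · simp [hsuccs, he, hzero, PySem.Set.empty]
      | some j =>
        have : cgStepF d e = d.insert e.1 (PySem.Set.ofList [j]) := by simp [cgStepF, he, hc]
        rw [this, PySem.Dict.items_insert_of_not_contains d _ hc, ih, List.map_append]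
        congr 1
        · refine List.map_congr_left (fun i hi => ?_)
          have hine : (e.1 == i) = false := by
            have : i ∈ evs.map Prod.fst :=
              (PySem.List.mem_dedup (xs := evs.map Prod.fst) (x := i)).mp hi
            simp only [beq_eq_false_iff_ne, ne_eq]
            intro hh; exact hmem (hh ▸ this)
          simp [hsuccs, hine]
        · simp [hsuccs, he, hzero]

-- backward characterization
theorem bwd_char (evs : List (String × Option String)) :
    ((evs.foldl cgStepB PySem.Dict.empty)).items
      = (PySem.List.dedup (evs.filterMap Prod.snd)).map (fun j => (j, PySem.Set.ofList (cgPreds evs j))) := by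
  induction evs using List.reverseRecOn with
  | nil => rfl
  | append_singleton evs e ih =>
    have hnd : (PySem.List.dedup (evs.filterMap Prod.snd)).Nodup := PySem.List.nodup_dedup _
    set d := evs.foldl cgStepB PySem.Dict.empty with hd
    have hkeys := keys_of_items_map d ih
    have hcont := contains_of_items_map d ih
    have hpreds : ∀ j, cgPreds (evs ++ [e]) j
        = cgPreds evs j ++ (if e.2 == some j then some e.1 else none).toList := by
      intro j
      rw [cgPreds, cgPreds, List.filterMap_append]
      obtain ⟨a, b⟩ := e
      cases b with
      | none => simp
      | some v => by_cases hb : v = j <;> simp [hb]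
    rw [List.foldl_append, List.foldl_cons, List.foldl_nil, ← hd, List.filterMap_append]
    match he : e.2 with
    | none =>
      have : cgStepB d e = d := by simp [cgStepB, he]
      rw [this, ih]
      simp only [List.filterMap_cons, he, List.filterMap_nil, List.append_nil]
      refine List.map_congr_left (fun j hj => ?_)
      simp [hpreds, he]
    | some j =>
      simp only [List.filterMap_cons, he, List.filterMap_nil, dedup_snoc]
      have hnew : j ∉ evs.filterMap Prod.snd → cgPreds evs j = [] := by
        intro h
        refine List.filterMap_eq_nil_iff.mpr ?_
        intro a ha
        have : a.2 ≠ some j := fun hh => h (List.mem_filterMap.mpr ⟨a, ha, hh⟩)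
        simp [this]
      by_cases hmem : j ∈ evs.filterMap Prod.snd
      · simp only [hmem, if_true]
        have hstep : cgStepB d e = d.insert j (PySem.Set.add (d.getD j PySem.Set.empty) e.1) := by
          simp only [cgStepB, he, hcont, PySem.List.mem_dedup, hmem, decide_true, if_true]
          rfl
        have hget : d.getD j PySem.Set.empty = PySem.Set.ofList (cgPreds evs j) := by
          exact PySem.Dict.getD_of_mem_items d
            (by rw [ih]; exact List.mem_map_of_mem (by simpa [PySem.List.mem_dedup] using hmem))
            (by rw [hkeys]; exact hnd) _
        rw [hstep, PySem.Dict.items_insert_of_contains d _ (by simp [hcont, PySem.List.mem_dedup, hmem]), ih, List.map_map]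
        refine List.map_congr_left (fun j' hj' => ?_)
        by_cases hje : j' = j
        · subst hje
          simp [hpreds, he, ofList_snoc, Function.comp_def]
          rw [← hget]
          rfl
        · have hh : (j' == j) = false := by simp [hje]
          have h2 : ¬ j = j' := fun h => hje h.symm
          simp [hpreds, he, Function.comp_def, hh, hje, h2]
      · simp only [hmem, if_false]
        have hc : d.contains j = false := by simp [hcont, PySem.List.mem_dedup, hmem]
        have : cgStepB d e = d.insert j (PySem.Set.ofList [e.1]) := by simp [cgStepB, he, hc]
        rw [this, PySem.Dict.items_insert_of_not_contains d _ hc, ih, List.map_append]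
        congr 1
        · refine List.map_congr_left (fun j' hj' => ?_)
          have hj'mem : j' ∈ evs.filterMap Prod.snd :=
            (PySem.List.mem_dedup (xs := evs.filterMap Prod.snd) (x := j')).mp hj'
          have hne : (some j == some j') = false := by
            simp only [beq_eq_false_iff_ne, ne_eq, Option.some.injEq]
            intro hh; exact hmem (hh ▸ hj'mem)
          simp [hpreds, he, hne]
        · simp [hpreds, he, hnew hmem]

-- generic filterMap/filter translations
theorem filterMap_if_snd {α β : Type} (l : List (α × β)) (g : α → Bool) :
    l.filterMap (fun p => if g p.1 then some p.2 else none)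
      = (l.filter (fun p => g p.1)).map Prod.snd := by
  induction l with
  | nil => rfl
  | cons p l ih =>
    by_cases h : g p.1 <;> simp [List.filterMap_cons, List.filter_cons, h, ih]

theorem filterMap_if_fst {α β : Type} (l : List (α × β)) (g : β → Bool) :
    l.filterMap (fun p => if g p.2 then some p.1 else none)
      = (l.filter (fun p => g p.2)).map Prod.fst := by
  induction l with
  | nil => rfl
  | cons p l ih =>
    by_cases h : g p.2 <;> simp [List.filterMap_cons, List.filter_cons, h, ih]

-- per-ordering translations from the event stream to B's pair list
theorem ev_map_fst (o : List String) : (cgEv o).map Prod.fst = cgB_sources o := by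
  unfold cgEv cgB_sources
  by_cases h : o.length = 1
  · match o, h with
    | [a], _ => rfl
  · simp [h, List.map_map, Function.comp_def]

theorem ev_filterMap_snd (o : List String) :
    (cgEv o).filterMap Prod.snd = (o.zip (o.drop 1)).map Prod.snd := by
  unfold cgEv
  by_cases h : o.length = 1
  · match o, h with
    | [a], _ => rfl
  · simp [h, List.filterMap_map, Function.comp_def]

theorem ev_succs (o : List String) (i : String) :
    (cgEv o).filterMap (fun e => if e.1 == i then e.2 else none)
      = ((o.zip (o.drop 1)).filter (fun p => p.1 == i)).map Prod.snd := by
  unfold cgEv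
  by_cases h : o.length = 1
  · match o, h with
    | [a], _ => simp [List.filterMap_cons]
  · simp only [h, if_false, List.filterMap_map]
    rw [← filterMap_if_snd (o.zip (o.drop 1)) (fun a => a == i)]
    refine List.filterMap_congr (fun p _ => ?_)
    by_cases hp : p.1 = i <;> simp [hp]

theorem ev_preds (o : List String) (j : String) :
    (cgEv o).filterMap (fun e => if e.2 == some j then some e.1 else none)
      = ((o.zip (o.drop 1)).filter (fun p => p.2 == j)).map Prod.fst := by
  unfold cgEv
  by_cases h : o.length = 1
  · match o, h with
    | [a], _ => simp [List.filterMap_cons]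
  · simp only [h, if_false, List.filterMap_map]
    rw [← filterMap_if_fst (o.zip (o.drop 1)) (fun b => b == j)]
    refine List.filterMap_congr (fun p _ => ?_)
    by_cases hp : p.2 = j <;> simp [hp]

-- ===== VERDICT (by name: the statement is the Claim_ definition above) =====
theorem compute_graph_spec : Claim_equal_compute_graph := by
  intro orderings _
  unfold Spec_compute_graph compute_graph compute_graph_alt
  rw [cgA_fold_split]
  dsimp only
  set evs := orderings.flatMap cgEv with hevs
  set pairs := orderings.flatMap (fun o => o.zip (o.drop 1)) with hpairs
  have hfst : evs.map Prod.fst = orderings.flatMap cgB_sources := by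
    simp only [hevs, List.map_flatMap]
    exact List.flatMap_congr (fun o _ => ev_map_fst o)
  have hsnd : evs.filterMap Prod.snd = pairs.map Prod.snd := by
    simp only [hevs, hpairs, List.filterMap_flatMap, List.map_flatMap]
    exact List.flatMap_congr (fun o _ => ev_filterMap_snd o)
  have hsuccs : ∀ i, cgSuccs evs i = (pairs.filter (fun p => p.1 == i)).map Prod.snd := by
    intro i
    simp only [cgSuccs, hevs, hpairs, List.filterMap_flatMap, List.filter_flatMap, List.map_flatMap]
    exact List.flatMap_congr (fun o _ => ev_succs o i)
  have hpreds : ∀ j, cgPreds evs j = (pairs.filter (fun p => p.2 == j)).map Prod.fst := by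
    intro j
    simp only [cgPreds, hevs, hpairs, List.filterMap_flatMap, List.filter_flatMap, List.map_flatMap]
    exact List.flatMap_congr (fun o _ => ev_preds o j)
  have hBf : (((PySem.List.dedup (orderings.flatMap cgB_sources)).foldl
      (fun d i => d.insert i (PySem.Set.ofList ((pairs.filter (fun p => p.1 == i)).map Prod.snd)))
      PySem.Dict.empty)).items
      = (PySem.List.dedup (orderings.flatMap cgB_sources)).map
          (fun i => (i, PySem.Set.ofList ((pairs.filter (fun p => p.1 == i)).map Prod.snd))) := by
    have h := PySem.Dict.items_foldl_insert_fresh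
      (PySem.List.dedup (orderings.flatMap cgB_sources)) (fun i => i)
      (fun i => PySem.Set.ofList ((pairs.filter (fun p => p.1 == i)).map Prod.snd))
      PySem.Dict.empty (fun a _ => PySem.Dict.contains_empty a)
      (by simpa using PySem.List.nodup_dedup _)
    simp at h
    exact h
  have hBb : (((PySem.List.dedup (pairs.map Prod.snd)).foldl
      (fun d j => d.insert j (PySem.Set.ofList ((pairs.filter (fun p => p.2 == j)).map Prod.fst)))
      PySem.Dict.empty)).items
      = (PySem.List.dedup (pairs.map Prod.snd)).map
          (fun j => (j, PySem.Set.ofList ((pairs.filter (fun p => p.2 == j)).map Prod.fst))) := by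
    have h := PySem.Dict.items_foldl_insert_fresh
      (PySem.List.dedup (pairs.map Prod.snd)) (fun j => j)
      (fun j => PySem.Set.ofList ((pairs.filter (fun p => p.2 == j)).map Prod.fst))
      PySem.Dict.empty (fun a _ => PySem.Dict.contains_empty a)
      (by simpa using PySem.List.nodup_dedup _)
    simp at h
    exact h
  refine Prod.ext ?_ ?_
  · rw [fwd_char, hBf, hfst]
    exact List.map_congr_left (fun i _ => by rw [hsuccs])
  · rw [bwd_char, hBb, hsnd]
    exact List.map_congr_left (fun j _ => by rw [hpreds])
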